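-- pv_equiv track=rewrite | github.com/DziyanaLysak/BelHard_py1_81_HW | lesson9/7.py | login_verification
-- ===== SOURCE A (Python) =====
-- def login_verification(login):
--     for symbol in login:
--         if not ('a' <= symbol <= 'z' or
--                 'A' <= symbol <= 'Z' or
--                 '0' <= symbol <= '9' or
--                 symbol == '_'):
--             return False
--     return True
-- ===== SOURCE B (Python) =====
-- import re
--
-- _LOGIN_RE = re.compile(r'[A-Za-z0-9_]*\Z')
--
-- def login_verification(login):
--     return _LOGIN_RE.match(login) is not None
-- ===== Notes on version B (the rewrite author's own statement) =====
-- stated objective: idiomatic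
-- what changed: Replaced the explicit per-character loop with range comparisons by a single compiled ASCII character-class regex fullmatched over the whole string.
import Mathlib
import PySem

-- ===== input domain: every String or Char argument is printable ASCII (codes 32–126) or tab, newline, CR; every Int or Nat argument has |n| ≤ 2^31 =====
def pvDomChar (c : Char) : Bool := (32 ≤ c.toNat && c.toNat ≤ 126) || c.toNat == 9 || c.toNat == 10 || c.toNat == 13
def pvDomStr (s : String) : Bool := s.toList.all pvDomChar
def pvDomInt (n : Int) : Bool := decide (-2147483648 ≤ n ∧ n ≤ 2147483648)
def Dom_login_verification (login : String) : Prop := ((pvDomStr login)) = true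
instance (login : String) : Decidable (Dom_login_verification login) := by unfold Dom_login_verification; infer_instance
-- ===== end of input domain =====

-- B replaces A's explicit per-character loop with a fullmatch of the ASCII character class [A-Za-z0-9_]* (idiomatic).

-- ===== PORT A =====
-- A's loop: scan the characters in order; return False at the first symbol outside the
-- four allowed ranges, True if the scan finishes.
def loginVerLoop : List Char → Bool
  | [] => true
  | c :: rest =>
      if ¬(('a' ≤ c ∧ c ≤ 'z') ∨ ('A' ≤ c ∧ c ≤ 'Z') ∨ ('0' ≤ c ∧ c ≤ '9') ∨ c = '_')
      then false
      else loginVerLoop rest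

def login_verification (login : String) : Bool := loginVerLoop login.toList

-- ===== PORT B =====
-- B is `re.fullmatch(r'[A-Za-z0-9_]*', login) is not None`; a fullmatch of a character
-- class repeated with `*` holds iff every character belongs to the class, which is the
-- exact semantics ported here.
def loginClassChar (c : Char) : Bool :=
  ('A' ≤ c && c ≤ 'Z') || ('a' ≤ c && c ≤ 'z') || ('0' ≤ c && c ≤ '9') || c == '_'

def login_verification_alt (login : String) : Bool := login.toList.all loginClassChar

-- ===== PRECONDITION & SPEC =====
def Spec_login_verification (login : String) (out : Bool) : Prop := out = login_verification_alt login
instance (login : String) (out : Bool) : Decidable (Spec_login_verification login out) := by unfold Spec_login_verification; infer_instance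

-- ===== CLAIM (what is proved, stated in full; the proofs are below) =====
def Claim_equal_login_verification : Prop := ∀ (login : String), Dom_login_verification login → Spec_login_verification login (login_verification login)

-- ===== LEMMAS AND PROOFS =====
theorem loginVerLoop_eq_all (cs : List Char) : loginVerLoop cs = cs.all loginClassChar := by
  induction cs with
  | nil => rfl
  | cons c rest ih =>
      simp only [loginVerLoop, List.all_cons]
      split_ifs with h
      · have hc : loginClassChar c = true := by
          simp only [loginClassChar, Bool.or_eq_true, Bool.and_eq_true,
            decide_eq_true_eq, beq_iff_eq]
          tauto
        simp [hc, ih]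
      · have hc : loginClassChar c = false := by
          rw [Bool.eq_false_iff]
          intro htrue
          simp only [loginClassChar, Bool.or_eq_true, Bool.and_eq_true,
            decide_eq_true_eq, beq_iff_eq] at htrue
          exact h (by tauto)
        simp [hc]

-- ===== VERDICT (by name: the statement is the Claim_ definition above) =====
theorem login_verification_spec : Claim_equal_login_verification := by
  intro login _
  unfold Spec_login_verification login_verification login_verification_alt
  exact loginVerLoop_eq_all login.toList
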